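-- pv_equiv track=rewrite | github.com/farggus/ubuntu-task-manager | src/collectors/fail2ban.py | _extract_jail_from_log_line
-- ===== SOURCE A (Python) =====
-- from typing import Any, Dict, List, Optional, Set, Tuple
--
-- def _extract_jail_from_log_line(parts: List[str]) -> str:
--     """Extract jail name from log line parts."""
--     try:
--         if 'Unban' in parts:
--             unban_idx = parts.index('Unban')
--             for i in range(unban_idx - 1, -1, -1):
--                 if parts[i].startswith('[') and parts[i].endswith(']'):
--                     return parts[i].strip('[]')
--     except (ValueError, IndexError):
--         pass
--     return 'unknown'
-- ===== SOURCE B (Python) =====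
-- from typing import List
--
-- def _extract_jail_from_log_line(parts: List[str]) -> str:
--     """Extract jail name from log line parts (single forward pass)."""
--     last_bracket = None
--     for p in parts:
--         if p == 'Unban':
--             return last_bracket.strip('[]') if last_bracket is not None else 'unknown'
--         if p.startswith('[') and p.endswith(']'):
--             last_bracket = p
--     return 'unknown'
-- ===== Notes on version B (the rewrite author's own statement) =====
-- stated objective: simpler
-- what changed: Replaces the membership test + index() + backward index scan with one forward pass that tracks the last bracketed token seen before the first 'Unban'.
import Mathlib
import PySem

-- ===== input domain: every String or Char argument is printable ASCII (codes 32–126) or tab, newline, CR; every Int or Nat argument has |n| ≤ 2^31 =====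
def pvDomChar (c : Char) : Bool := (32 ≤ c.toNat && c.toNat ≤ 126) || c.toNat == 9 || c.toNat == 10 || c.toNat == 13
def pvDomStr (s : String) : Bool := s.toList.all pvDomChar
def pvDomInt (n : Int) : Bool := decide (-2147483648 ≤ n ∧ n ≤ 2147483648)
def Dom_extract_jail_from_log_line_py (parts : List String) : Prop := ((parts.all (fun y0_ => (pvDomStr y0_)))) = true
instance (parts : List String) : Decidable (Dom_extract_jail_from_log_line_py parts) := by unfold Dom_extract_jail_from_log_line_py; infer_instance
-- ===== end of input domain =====

-- ===== PORT A =====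
-- B is a single forward pass tracking the last bracketed token before the first 'Unban';
-- A does a membership test, an index(), then a backward scan. Return values agree everywhere.
def pvIsBr (p : String) : Bool := PySem.Str.startswith p "[" && PySem.Str.endswith p "]"

-- the backward for-loop body of A (over range(unban_idx-1, -1, -1))
def pvLoopA (parts : List String) : List Int → String
  | [] => "unknown"
  | i :: rest =>
    match PySem.List.pyGet? parts i with
    | none => "unknown"   -- IndexError would be caught and yield 'unknown' (never reached: i is in range)
    | some p => if pvIsBr p then PySem.Str.stripChars p "[]" else pvLoopA parts rest

def extract_jail_from_log_line_py (parts : List String) : String :=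
  if parts.contains "Unban" then
    match PySem.List.index? parts "Unban" with
    | some unban_idx => pvLoopA parts (PySem.List.pyRange ((unban_idx : Int) - 1) (-1) (-1))
    | none => "unknown"
  else "unknown"

-- ===== PORT B =====
-- forward loop with accumulator last_bracket (none = Python None)
def pvLoopB : List String → Option String → String
  | [], _ => "unknown"
  | p :: rest, last =>
    if p = "Unban" then
      match last with
      | some b => PySem.Str.stripChars b "[]"
      | none => "unknown"
    else if pvIsBr p then pvLoopB rest (some p)
    else pvLoopB rest last

def extract_jail_from_log_line_py_alt (parts : List String) : String :=
  pvLoopB parts none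

-- ===== PRECONDITION & SPEC =====
def Spec_extract_jail_from_log_line_py (parts : List String) (out : String) : Prop := out = extract_jail_from_log_line_py_alt parts
instance (parts : List String) (out : String) : Decidable (Spec_extract_jail_from_log_line_py parts out) := by unfold Spec_extract_jail_from_log_line_py; infer_instance

-- ===== CLAIM (what is proved, stated in full; the proofs are below) =====
def Claim_equal_extract_jail_from_log_line_py : Prop := ∀ (parts : List String), Dom_extract_jail_from_log_line_py parts → Spec_extract_jail_from_log_line_py parts (extract_jail_from_log_line_py parts)

-- ===== LEMMAS AND PROOFS =====
-- the common characterisation: last bracketed token of the prefix before the first 'Unban'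
def pvResult (pre : List String) (acc : Option String) : String :=
  match (pre.reverse.find? pvIsBr).or acc with
  | some b => PySem.Str.stripChars b "[]"
  | none => "unknown"

lemma pvLoopB_eq (l : List String) (acc : Option String) :
    pvLoopB l acc =
      match PySem.List.index? l "Unban" with
      | none => "unknown"
      | some k => pvResult (l.take k) acc := by
  induction l generalizing acc with
  | nil => cases acc <;> simp [pvLoopB, PySem.List.index?]
  | cons p rest ih =>
    by_cases hp : p = "Unban"
    · subst hp
      rw [PySem.List.index?_cons_self]
      cases acc <;> simp [pvLoopB, pvResult]
    · rw [PySem.List.index?_cons_of_ne rest hp]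
      have hstep : pvLoopB (p :: rest) acc = pvLoopB rest (if pvIsBr p then some p else acc) := by
        by_cases hbr : pvIsBr p = true <;> simp [pvLoopB, hp, hbr]
      rw [hstep, ih]
      cases hidx : PySem.List.index? rest "Unban" with
      | none => simp
      | some k =>
        by_cases hbr : pvIsBr p = true <;>
          simp [pvResult, List.find?_append, hbr]

lemma pvLoopA_eq (parts : List String) (k : Nat) (hk : k ≤ parts.length) :
    pvLoopA parts (PySem.List.pyRange ((k : Int) - 1) (-1) (-1)) =
      pvResult (parts.take k) none := by
  induction k with
  | zero =>
    rw [show ((0 : Nat) : Int) - 1 = -1 by norm_num,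
        PySem.List.pyRange_neg_one_eq_nil (by norm_num)]
    simp [pvLoopA, pvResult]
  | succ k ih =>
    have hk' : k < parts.length := hk
    have hcons : PySem.List.pyRange (((k + 1 : Nat) : Int) - 1) (-1) (-1)
        = (k : Int) :: PySem.List.pyRange ((k : Int) - 1) (-1) (-1) := by
      rw [show ((k + 1 : Nat) : Int) - 1 = (k : Int) by push_cast; ring,
          PySem.List.pyRange_neg_one_cons (by omega)]
    have hget : PySem.List.pyGet? parts ((k : Int)) = some parts[k] := by
      rw [PySem.List.pyGet?_natCast]; exact List.getElem?_eq_getElem hk'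
    have htake : parts.take (k + 1) = parts.take k ++ [parts[k]] := by
      rw [List.take_add_one]; simp [List.getElem?_eq_getElem hk']
    have hres : pvResult (parts.take (k + 1)) none
        = if pvIsBr parts[k] = true then PySem.Str.stripChars parts[k] "[]"
          else pvResult (parts.take k) none := by
      by_cases hbr : pvIsBr parts[k] = true <;>
        simp only [pvResult, htake, List.reverse_append, List.reverse_cons, List.reverse_nil,
          List.nil_append, List.cons_append, List.find?_cons, hbr, cond_true, cond_false,
          if_true, if_false, Option.some_or, Option.or_none, Bool.false_eq_true, ite_false]
    rw [hcons, hres]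
    by_cases hbr : pvIsBr parts[k] = true <;>
      simp [pvLoopA, hget, hbr, ih (le_of_lt hk')]

-- ===== VERDICT (by name: the statement is the Claim_ definition above) =====
theorem extract_jail_from_log_line_py_spec : Claim_equal_extract_jail_from_log_line_py := by
  intro parts _
  unfold Spec_extract_jail_from_log_line_py extract_jail_from_log_line_py extract_jail_from_log_line_py_alt
  rw [pvLoopB_eq]
  by_cases hmem : "Unban" ∈ parts
  · have hsome := (PySem.List.index?_isSome_iff parts "Unban").mpr hmem
    obtain ⟨k, hk⟩ := Option.isSome_iff_exists.mp hsome
    obtain ⟨hlt, -, -⟩ := PySem.List.getElem_of_index?_eq_some hk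
    rw [hk, if_pos (by simpa using hmem)]
    exact pvLoopA_eq parts k (le_of_lt hlt)
  · have hnone := (PySem.List.index?_eq_none_iff parts "Unban").mpr hmem
    rw [hnone, if_neg (by simpa using hmem)]
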